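-- pv_equiv track=rewrite | github.com/Gsllchb/code-jam-solutions | src/watson_and_intervals-small.py | solve
-- ===== SOURCE A (Python) =====
-- def solve(L, R):
--     R = [r + 1 for r in R]
--     arr = [(i, 0) for i in sorted(set(L + R))]
--     for l, r in zip(L, R):
--         start = search(arr, l)
--         stop = search(arr, r)
--         for i in range(start, stop):
--             v, w = arr[i]
--             arr[i] = (v, w + 1)
--
--     assert arr[-1][1] == 0
--     stat = {arr[-1][0]: 0}
--     for i in range(len(arr) - 2, -1, -1):
--         v, w = arr[i]
--         value = (w == 1) * (arr[i + 1][0] - v) + stat[arr[i + 1][0]]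
--         stat[v] = value
--
--     return total_cover(arr) - max_decreasing(stat, L, R)
--
-- def max_decreasing(stat, L, R):
--     res = -1
--     for l, r in zip(L, R):
--         res = max(res, stat[l] - stat[r])
--     return res
--
-- def total_cover(arr):
--     total = 0
--     for i in range(len(arr) - 1):
--         if arr[i][1] > 0:
--             total += arr[i + 1][0] - arr[i][0]
--     return total
--
-- def search(arr, target, lo=0, hi=None):
--     if hi is None:
--         hi = len(arr)
--     mi = (lo + hi) // 2
--     v, _ = arr[mi]
--     if v == target:
--         return mi
--     if target < v:
--         return search(arr, target, lo, mi)
--     else: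
--         return search(arr, target, mi + 1, hi)
-- ===== SOURCE B (Python) =====
-- def solve(L, R):
--     R2 = [r + 1 for r in R]
--     xs = sorted(set(L + R2))
--     # sweep-line: +1 at each left endpoint, -1 just after each right endpoint
--     delta = {}
--     for l, r in zip(L, R):
--         if l <= r:
--             delta[l] = delta.get(l, 0) + 1
--             delta[r + 1] = delta.get(r + 1, 0) - 1
--     # prefix sums: cnt[i] = number of intervals covering segment [xs[i], xs[i+1])
--     cnt = []
--     c = 0
--     for x in xs:
--         c += delta.get(x, 0)
--         cnt.append(c)
--     total = sum(y - x for (x, y), c in zip(zip(xs, xs[1:]), cnt) if c > 0)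
--     # suffix sums of singly-covered length, keyed by coordinate
--     suf = {xs[-1]: 0} if xs else {}
--     s = 0
--     for (x, y), c in reversed(list(zip(zip(xs, xs[1:]), cnt))):
--         s += (y - x) if c == 1 else 0
--         suf[x] = s
--     best = -1
--     for l, r in zip(L, R2):
--         best = max(best, suf[l] - suf[r])
--     return total - best
-- ===== Notes on version B (the rewrite author's own statement) =====
-- stated objective: faster
-- what changed: Replaces A's per-interval recursive binary searches and per-cell increment loops over the coordinate array with a sweep line: a delta dict (+1 at l, -1 at r+1) whose single prefix-sum pass over the sorted coordinates yields the per-segment coverage counts.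
import Mathlib
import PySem

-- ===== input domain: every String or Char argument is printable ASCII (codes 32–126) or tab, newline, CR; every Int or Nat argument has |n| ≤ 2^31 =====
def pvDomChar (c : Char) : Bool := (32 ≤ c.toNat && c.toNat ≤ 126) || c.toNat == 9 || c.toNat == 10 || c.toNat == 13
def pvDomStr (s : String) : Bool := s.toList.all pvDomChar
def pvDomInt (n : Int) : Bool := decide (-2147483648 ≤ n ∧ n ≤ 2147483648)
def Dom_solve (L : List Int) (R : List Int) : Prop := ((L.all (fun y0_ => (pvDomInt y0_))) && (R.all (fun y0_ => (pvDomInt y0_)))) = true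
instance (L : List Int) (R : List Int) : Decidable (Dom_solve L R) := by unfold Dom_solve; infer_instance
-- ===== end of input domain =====

-- B replaces A's per-interval recursive binary searches and per-cell increment loops with a
-- sweep line: a delta dict (+1 at l, -1 at r+1) whose prefix sums over the sorted coordinates
-- give the per-segment coverage counts (objective: faster).


-- ===== PORT A =====
-- hand port of the Python list assignment arr[i] = v (exact: none = IndexError)
def pySetA {α : Type} (xs : List α) (i : Int) (v : α) : Option (List α) :=
  if 0 ≤ i ∧ i < xs.length then some (xs.set i.toNat v)
  else if -(xs.length : Int) ≤ i ∧ i < 0 then some (xs.set ((xs.length : Int) + i).toNat v)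
  else none

-- `search(arr, target, lo, hi)`: fuel bounds the recursion depth (hi - lo shrinks by at least
-- one per call, so fuel = len(arr) + 1 at the call sites never runs out where the Python returns)
def searchA (fuel : Nat) (arr : List (Int × Int)) (target lo hi : Int) : Option Int :=
  match fuel with
  | 0 => none
  | fuel + 1 =>
    let mi := PySem.Int.floordiv (lo + hi) 2
    match PySem.List.pyGet? arr mi with
    | none => none
    | some vw =>
      if vw.1 = target then some mi
      else if target < vw.1 then searchA fuel arr target lo mi
      else searchA fuel arr target (mi + 1) hi

-- `for i in range(start, stop): v, w = arr[i]; arr[i] = (v, w + 1)`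
def bumpA (arr : List (Int × Int)) (start stop : Int) : Option (List (Int × Int)) :=
  (PySem.List.pyRange start stop 1).foldl
    (fun acc i => acc.bind fun arr =>
      match PySem.List.pyGet? arr i with
      | none => none
      | some vw => pySetA arr i (vw.1, vw.2 + 1))
    (some arr)

-- the main `for l, r in zip(L, R)` loop of A (R already incremented)
def covA (q : List (Int × Int)) (arr0 : List (Int × Int)) : Option (List (Int × Int)) :=
  q.foldl
    (fun acc p => acc.bind fun arr =>
      (searchA (arr.length + 1) arr p.1 0 (arr.length : Int)).bind fun start =>
      (searchA (arr.length + 1) arr p.2 0 (arr.length : Int)).bind fun stop =>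
      bumpA arr start stop)
    (some arr0)

-- `for i in range(len(arr)-2, -1, -1)` building `stat`
-- (arr[i] / arr[i+1] are read with pyGetD: every i in this range is a valid index, so exact)
def statA (arr : List (Int × Int)) (stat0 : PySem.Dict Int Int) : Option (PySem.Dict Int Int) :=
  (PySem.List.pyRange ((arr.length : Int) - 2) (-1) (-1)).foldl
    (fun acc i => acc.bind fun stat =>
      let vw := PySem.List.pyGetD arr i (0, 0)
      let vw1 := PySem.List.pyGetD arr (i + 1) (0, 0)
      match stat.get? vw1.1 with
      | none => none   -- KeyError (never happens: arr[i+1]'s coordinate was inserted before)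
      | some s => some (stat.insert vw.1 ((if vw.2 = 1 then 1 else 0) * (vw1.1 - vw.1) + s)))
    (some stat0)

-- `total_cover` (arr[i] read with pyGetD: i and i+1 are valid indices for i in range(len-1))
def totalCoverA (arr : List (Int × Int)) : Int :=
  (PySem.List.pyRange 0 ((arr.length : Int) - 1) 1).foldl
    (fun total i =>
      if (PySem.List.pyGetD arr i (0, 0)).2 > 0 then
        total + ((PySem.List.pyGetD arr (i + 1) (0, 0)).1 - (PySem.List.pyGetD arr i (0, 0)).1)
      else total)
    0

-- `max_decreasing`
def maxDecreasingA (stat : PySem.Dict Int Int) (q : List (Int × Int)) : Option Int :=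
  q.foldl
    (fun acc p => acc.bind fun res =>
      match stat.get? p.1, stat.get? p.2 with
      | some a, some b => some (max res (a - b))
      | _, _ => none)   -- KeyError (never happens: every endpoint is a key of stat)
    (some (-1))

def solve (L : List Int) (R : List Int) : Int :=
  let R' := R.map (fun r => r + 1)
  let xs := PySem.List.sorted (PySem.Set.ofList (L ++ R')) (fun x => x) false
  match covA (L.zip R') (xs.map (fun i => (i, (0 : Int)))) with
  | none => 0   -- an exception inside the main loop (provably unreachable)
  | some arr =>
    match PySem.List.pyGet? arr (-1) with
    | none => 0   -- arr[-1] IndexError: L and R both empty (excluded by Pre_solve)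
    | some last =>
      if last.2 = 0 then   -- the assert
        match statA arr (PySem.Dict.empty.insert last.1 0) with
        | none => 0
        | some stat =>
          match maxDecreasingA stat (L.zip R') with
          | none => 0
          | some md => totalCoverA arr - md
      else 0   -- AssertionError (provably unreachable)

-- ===== PORT B =====
-- `delta[l] = delta.get(l,0)+1 ; delta[r+1] = delta.get(r+1,0)-1` under the `l <= r` guard
def deltaB (z : List (Int × Int)) : PySem.Dict Int Int :=
  z.foldl
    (fun d p =>
      if p.1 ≤ p.2 then
        let d1 := d.insert p.1 (d.getD p.1 0 + 1)
        d1.insert (p.2 + 1) (d1.getD (p.2 + 1) 0 - 1)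
      else d)
    PySem.Dict.empty

-- `cnt = []; c = 0; for x in xs: c += delta.get(x, 0); cnt.append(c)`
def cntB (delta : PySem.Dict Int Int) (xs : List Int) : List Int :=
  (xs.foldl
    (fun (acc : List Int × Int) x =>
      let c := acc.2 + delta.getD x 0
      (acc.1 ++ [c], c))
    ([], 0)).1

-- `total = sum(y - x for (x, y), c in zip(zip(xs, xs[1:]), cnt) if c > 0)`
def totalB (xs cnt : List Int) : Int :=
  ((((xs.zip (PySem.List.slice xs (some 1) none)).zip cnt).filter
      (fun t => t.2 > 0)).map (fun t => t.1.2 - t.1.1)).sum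

-- `suf = {xs[-1]: 0} if xs else {}` then the reversed sweep filling suf
def sufB (xs cnt : List Int) : PySem.Dict Int Int :=
  let init : PySem.Dict Int Int :=
    match PySem.List.pyGet? xs (-1) with
    | some v => PySem.Dict.empty.insert v 0
    | none => PySem.Dict.empty
  (((xs.zip (PySem.List.slice xs (some 1) none)).zip cnt).reverse.foldl
    (fun (acc : PySem.Dict Int Int × Int) t =>
      let s := acc.2 + (if t.2 = 1 then t.1.2 - t.1.1 else 0)
      (acc.1.insert t.1.1 s, s))
    (init, 0)).1

def bestB (suf : PySem.Dict Int Int) (q : List (Int × Int)) : Option Int :=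
  q.foldl
    (fun acc p => acc.bind fun res =>
      match suf.get? p.1, suf.get? p.2 with
      | some a, some b => some (max res (a - b))
      | _, _ => none)   -- KeyError (never happens: every endpoint is a key of suf)
    (some (-1))

def solve_alt (L : List Int) (R : List Int) : Int :=
  let R2 := R.map (fun r => r + 1)
  let xs := PySem.List.sorted (PySem.Set.ofList (L ++ R2)) (fun x => x) false
  let delta := deltaB (L.zip R)
  let cnt := cntB delta xs
  match bestB (sufB xs cnt) (L.zip R2) with
  | none => 0
  | some best => totalB xs cnt - best

-- ===== PRECONDITION & SPEC =====
-- Pre_ excludes only L = R = [], where the Python A raises IndexError on arr[-1].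
def Pre_solve (L : List Int) (R : List Int) : Prop := ¬(L = [] ∧ R = [])
instance (L : List Int) (R : List Int) : Decidable (Pre_solve L R) := by
  unfold Pre_solve; infer_instance

def pvWitness_solve : List Int × List Int := ([0], [0])

def Spec_solve (L : List Int) (R : List Int) (out : Int) : Prop := out = solve_alt L R
instance (L : List Int) (R : List Int) (out : Int) : Decidable (Spec_solve L R out) := by
  unfold Spec_solve; infer_instance

-- ===== CLAIM (what is proved, stated in full; the proofs are below) =====
def Claim_equal_solve : Prop :=
  ∀ (L : List Int) (R : List Int), Dom_solve L R → Pre_solve L R → Spec_solve L R (solve L R)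

-- ===== LEMMAS AND PROOFS =====

-- interval count: number of pairs (l, r) of z with l ≤ x < r + 1
def Fcnt (z : List (Int × Int)) (x : Int) : Int :=
  (z.countP (fun p => decide (p.1 ≤ x ∧ x < p.2 + 1)) : Int)

-- same count for the already-incremented pair list q = zip L R'
def FAcnt (q : List (Int × Int)) (x : Int) : Int :=
  (q.countP (fun p => decide (p.1 ≤ x ∧ x < p.2)) : Int)

-- length of the i-th segment if it is covered exactly once, else 0
def gseg (xs : List Int) (z : List (Int × Int)) (i : Nat) : Int :=
  (if Fcnt z (xs.getD i 0) = 1 then 1 else 0) * (xs.getD (i + 1) 0 - xs.getD i 0)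

-- suffix sums of gseg: the common value of A's stat[xs[i]] and B's suf[xs[i]]
def Sspec (xs : List Int) (z : List (Int × Int)) (i : Nat) : Int :=
  if i + 1 < xs.length then gseg xs z i + Sspec xs z (i + 1) else 0
termination_by xs.length - i

-- per-pair delta count: the value of B's delta dict at x
def Ccnt (z : List (Int × Int)) (x : Int) : Int :=
  (((z.filter (fun p => decide (p.1 ≤ p.2))).countP (fun p => decide (p.1 = x))) : Int)
  - (((z.filter (fun p => decide (p.1 ≤ p.2))).countP (fun p => decide (p.2 + 1 = x))) : Int)

-- strictly sorted lists: order of values ↔ order of indices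
theorem sortedStrict_le_iff {xs : List Int} (hs : xs.Pairwise (· < ·))
    {i k : Nat} (hi : i < xs.length) (hk : k < xs.length) :
    xs[k] ≤ xs[i] ↔ k ≤ i := by
  rw [List.pairwise_iff_getElem] at hs
  constructor
  · intro h; by_contra hik
    exact absurd (hs i k hi hk (by omega)) (by omega)
  · intro h
    rcases Nat.eq_or_lt_of_le h with h' | h'
    · simp [h']
    · exact le_of_lt (hs k i hk hi h')

theorem sortedStrict_inj {xs : List Int} (hs : xs.Pairwise (· < ·))
    {i k : Nat} (hi : i < xs.length) (hk : k < xs.length) (h : xs[i] = xs[k]) : i = k := by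
  have h1 := (sortedStrict_le_iff hs hi hk).mp (le_of_eq h.symm)
  have h2 := (sortedStrict_le_iff hs hk hi).mp (le_of_eq h)
  omega

theorem sortedStrict_lt_iff {xs : List Int} (hs : xs.Pairwise (· < ·))
    {i k : Nat} (hi : i < xs.length) (hk : k < xs.length) :
    xs[k] < xs[i] ↔ k < i := by
  constructor
  · intro h1; by_contra h2
    have := (sortedStrict_le_iff hs hk hi).mpr (by omega)
    omega
  · intro h1; by_contra h2
    have ha := (sortedStrict_le_iff hs hi hk).mpr (by omega)
    have hb : xs[i] = xs[k] := by omega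
    have := sortedStrict_inj hs hi hk hb
    omega

theorem mem_take_iff_le {xs : List Int} (hs : xs.Pairwise (· < ·))
    {i : Nat} (hi : i < xs.length) {v : Int} (hv : v ∈ xs) :
    v ∈ xs.take (i + 1) ↔ v ≤ xs[i] := by
  obtain ⟨j, hj, rfl⟩ := List.mem_iff_getElem.mp hv
  constructor
  · intro h
    obtain ⟨j', hj', heq⟩ := List.mem_iff_getElem.mp h
    have hj'' : j' < xs.length := by
      have := List.length_take (l := xs) (i := i + 1); omega
    rw [List.getElem_take] at heq
    have hj'i : j' ≤ i := by
      have := List.length_take (l := xs) (i := i + 1); omega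
    calc xs[j] = xs[j'] := heq.symm
      _ ≤ xs[i] := (sortedStrict_le_iff hs hi hj'').mpr hj'i
  · intro h
    have hji : j ≤ i := (sortedStrict_le_iff hs hi hj).mp h
    have : (xs.take (i + 1))[j]'(by
        have := List.length_take (l := xs) (i := i + 1); omega) = xs[j] :=
      List.getElem_take
    rw [← this]
    exact List.getElem_mem _

theorem searchA_eq {xs : List Int} (hs : xs.Pairwise (· < ·))
    {arr : List (Int × Int)} (harr : arr.map Prod.fst = xs)
    {t : Int} {k : Nat} (hk : k < xs.length) (ht : xs[k] = t) :
    ∀ (fuel : Nat) (lo hi : Int), 0 ≤ lo → hi ≤ (xs.length : Int) →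
      lo ≤ (k : Int) → (k : Int) < hi → (hi - lo).toNat ≤ fuel →
      searchA fuel arr t lo hi = some (k : Int) := by
  have hlen : arr.length = xs.length := by
    have := congrArg List.length harr; simpa using this
  intro fuel
  induction fuel with
  | zero => intro lo hi h0 hhi hlok hkhi hfuel; exfalso; omega
  | succ fuel ih =>
    intro lo hi h0 hhi hlok hkhi hfuel
    have hmlb := PySem.Int.floordiv_two_mid_bounds (lo := lo) (hi := hi) (by omega)
    have hmub : PySem.Int.floordiv (lo + hi) 2 < hi := by
      rw [PySem.Int.floordiv_lt_iff_lt_mul (by omega)]; omega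
    set mi := PySem.Int.floordiv (lo + hi) 2 with hmidef
    have h0mi : 0 ≤ mi := le_trans h0 hmlb.1
    have hmin : mi < (xs.length : Int) := lt_of_lt_of_le hmub hhi
    have hmnat : mi.toNat < arr.length := by omega
    have hmx : mi.toNat < xs.length := by omega
    have hget : PySem.List.pyGet? arr mi = some (arr[mi.toNat]) :=
      PySem.List.pyGet?_eq_some_getElem arr h0mi (by omega)
    have hfst : (arr[mi.toNat]).1 = xs[mi.toNat] := by
      have h1 := List.getElem_of_eq harr (show mi.toNat < (arr.map Prod.fst).length by simpa using hmnat)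
      simpa using h1
    simp only [searchA]
    rw [← hmidef, hget]
    dsimp only
    by_cases heq : (arr[mi.toNat]).1 = t
    · rw [if_pos heq]
      have hmk : mi.toNat = k :=
        sortedStrict_inj hs hmx hk (by rw [hfst] at heq; rw [heq, ht])
      congr 1; omega
    · rw [if_neg heq]
      by_cases hlt : t < (arr[mi.toNat]).1
      · rw [if_pos hlt]
        have hkmi : (k : Int) < mi := by
          have h2 : ¬ (xs[mi.toNat] ≤ xs[k]) := by rw [ht, ← hfst]; omega
          rw [sortedStrict_le_iff hs hk hmx] at h2; omega
        exact ih lo mi h0 (le_of_lt hmin) hlok hkmi (by omega)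
      · rw [if_neg hlt]
        have hmik : mi < (k : Int) := by
          have h2 : ¬ (xs[k] ≤ xs[mi.toNat]) := by
            rw [← ht, ← hfst] at *; omega
          rw [sortedStrict_le_iff hs hmx hk] at h2; omega
        exact ih (mi + 1) hi (by omega) hhi (by omega) hkhi (by omega)

theorem bumpA_aux : ∀ (n : Nat) (arr : List (Int × Int)) (start stop : Int),
    (stop - start).toNat = n → 0 ≤ start → stop ≤ (arr.length : Int) →
    ∃ arr', bumpA arr start stop = some arr' ∧ arr'.length = arr.length ∧
      ∀ (k : Nat) (hk : k < arr.length) (hk' : k < arr'.length),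
        arr'[k] =
          ((arr[k]).1, (arr[k]).2 + if start ≤ (k : Int) ∧ (k : Int) < stop then 1 else 0) := by
  intro n
  induction n with
  | zero =>
    intro arr start stop hn h0 hstop
    refine ⟨arr, ?_, rfl, ?_⟩
    · rw [bumpA, PySem.List.pyRange_one_eq_nil (by omega), List.foldl_nil]
    · intro k hk hk'
      rw [if_neg (by omega)]
      simp
  | succ n ih =>
    intro arr start stop hn h0 hstop
    have hss : start < stop := by omega
    have hsn : start.toNat < arr.length := by omega
    have hget : PySem.List.pyGet? arr start = some (arr[start.toNat]) :=
      PySem.List.pyGet?_eq_some_getElem arr h0 (by omega)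
    have hstep : bumpA arr start stop =
        bumpA (arr.set start.toNat ((arr[start.toNat]).1, (arr[start.toNat]).2 + 1))
          (start + 1) stop := by
      rw [bumpA, PySem.List.pyRange_one_cons hss, List.foldl_cons]
      rw [bumpA]
      congr 1
      show (some arr).bind _ = _
      rw [Option.bind_some, hget]
      dsimp only
      rw [pySetA, if_pos ⟨h0, by omega⟩]
    set arr1 := arr.set start.toNat ((arr[start.toNat]).1, (arr[start.toNat]).2 + 1) with harr1
    have hlen1 : arr1.length = arr.length := by simp [harr1]
    obtain ⟨arr', hrun, hlen, hpt⟩ := ih arr1 (start + 1) stop (by omega) (by omega) (by omega)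
    refine ⟨arr', by rw [hstep]; exact hrun, by omega, ?_⟩
    intro k hk hk'
    rw [hpt k (by omega) hk']
    by_cases hks : start.toNat = k
    · subst hks
      have e1 : arr1[start.toNat]'(by omega) = ((arr[start.toNat]).1, (arr[start.toNat]).2 + 1) := by
        simp [harr1]
      rw [e1, if_neg (by omega), if_pos (by omega)]
      simp
    · have e1 : arr1[k]'(by omega) = arr[k] := by
        simp [harr1, hks]
      rw [e1]
      by_cases hc : start ≤ (k : Int) ∧ (k : Int) < stop
      · rw [if_pos (by omega), if_pos hc]
      · rw [if_neg (by omega), if_neg hc]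

theorem bumpA_eq (arr : List (Int × Int)) (start stop : Int)
    (h0 : 0 ≤ start) (hstop : stop ≤ (arr.length : Int)) :
    ∃ arr', bumpA arr start stop = some arr' ∧ arr'.length = arr.length ∧
      ∀ (k : Nat) (hk : k < arr.length) (hk' : k < arr'.length),
        arr'[k] =
          ((arr[k]).1, (arr[k]).2 + if start ≤ (k : Int) ∧ (k : Int) < stop then 1 else 0) :=
  bumpA_aux (stop - start).toNat arr start stop rfl h0 hstop

theorem FAcnt_nil (x : Int) : FAcnt [] x = 0 := by simp [FAcnt]

theorem FAcnt_cons (p : Int × Int) (q : List (Int × Int)) (x : Int) :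
    FAcnt (p :: q) x = FAcnt q x + (if p.1 ≤ x ∧ x < p.2 then 1 else 0) := by
  simp only [FAcnt, List.countP_cons]
  push_cast
  by_cases h : p.1 ≤ x ∧ x < p.2 <;> simp [h]

theorem covA_eq {xs : List Int} (hs : xs.Pairwise (· < ·)) :
    ∀ (q : List (Int × Int)), (∀ p ∈ q, p.1 ∈ xs ∧ p.2 ∈ xs) →
    ∀ (arr : List (Int × Int)), arr.map Prod.fst = xs →
    ∃ arr', covA q arr = some arr' ∧ arr'.map Prod.fst = xs ∧
      ∀ (k : Nat) (hk : k < arr.length) (hk' : k < arr'.length) (hkx : k < xs.length),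
        (arr'[k]).2 = (arr[k]).2 + FAcnt q xs[k] := by
  intro q
  induction q with
  | nil =>
    intro _ arr harr
    exact ⟨arr, rfl, harr, by intro k hk hk' hkx; simp [FAcnt_nil]⟩
  | cons p q ih =>
    intro hq arr harr
    have hlen : arr.length = xs.length := by
      have := congrArg List.length harr; simpa using this
    obtain ⟨kl, hkl, hkleq⟩ := List.mem_iff_getElem.mp (hq p (by simp)).1
    obtain ⟨kr, hkr, hkreq⟩ := List.mem_iff_getElem.mp (hq p (by simp)).2
    have hs1 : searchA (arr.length + 1) arr p.1 0 (arr.length : Int) = some (kl : Int) :=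
      searchA_eq hs harr hkl hkleq _ 0 _ (by omega) (by omega) (by omega) (by omega) (by omega)
    have hs2 : searchA (arr.length + 1) arr p.2 0 (arr.length : Int) = some (kr : Int) :=
      searchA_eq hs harr hkr hkreq _ 0 _ (by omega) (by omega) (by omega) (by omega) (by omega)
    obtain ⟨arr1, hb, hblen, hbpt⟩ := bumpA_eq arr (kl : Int) (kr : Int) (by omega) (by omega)
    have harr1 : arr1.map Prod.fst = xs := by
      apply List.ext_getElem (by simpa [hblen] using hlen)
      intro k hk1 hk2
      have h3 : k < arr.length := by simpa [hblen] using hk1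
      rw [List.getElem_map]
      rw [hbpt k h3 (by omega)]
      have := List.getElem_of_eq harr (show k < (arr.map Prod.fst).length by simpa using h3)
      simpa using this
    obtain ⟨arr', hc, hcf, hcpt⟩ := ih (fun p' hp' => hq p' (List.mem_cons_of_mem _ hp')) arr1 harr1
    have hstep : covA (p :: q) arr = covA q arr1 := by
      simp only [covA, List.foldl_cons, Option.bind_some, hs1, hs2, hb]
    refine ⟨arr', by rw [hstep, hc], hcf, ?_⟩
    intro k hk hk' hkx
    have h4 : k < arr1.length := by omega
    rw [hcpt k h4 hk' hkx]
    have h5 : (arr1[k]'h4).2 = (arr[k]).2 + (if (kl : Int) ≤ (k : Int) ∧ (k : Int) < (kr : Int) then 1 else 0) := by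
      rw [hbpt k hk h4]
    rw [h5, FAcnt_cons]
    have e1 : ((kl : Int) ≤ (k : Int) ∧ (k : Int) < (kr : Int)) ↔ (p.1 ≤ xs[k] ∧ xs[k] < p.2) := by
      rw [← hkleq, ← hkreq, sortedStrict_le_iff hs hkx hkl, sortedStrict_lt_iff hs hkr hkx]
      omega
    simp only [e1]
    ring

-- named copy of statA's loop body (proof-side only; statA_eq_fold is rfl)
def statStep (arr : List (Int × Int)) (acc : Option (PySem.Dict Int Int)) (i : Int) :
    Option (PySem.Dict Int Int) :=
  acc.bind fun stat =>
    let vw := PySem.List.pyGetD arr i (0, 0)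
    let vw1 := PySem.List.pyGetD arr (i + 1) (0, 0)
    match stat.get? vw1.1 with
    | none => none
    | some s => some (stat.insert vw.1 ((if vw.2 = 1 then 1 else 0) * (vw1.1 - vw.1) + s))

theorem statA_eq_fold (arr : List (Int × Int)) (stat0 : PySem.Dict Int Int) :
    statA arr stat0 =
      (PySem.List.pyRange ((arr.length : Int) - 2) (-1) (-1)).foldl (statStep arr) (some stat0) :=
  rfl

theorem statA_loop {xs : List Int} (hs : xs.Pairwise (· < ·)) (z : List (Int × Int))
    (arr : List (Int × Int)) (hlen : arr.length = xs.length)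
    (harr : ∀ (k : Nat) (hk : k < arr.length) (hkx : k < xs.length),
      arr[k] = (xs[k], Fcnt z xs[k])) :
    ∀ (m : Nat), m ≤ xs.length - 1 →
    ∀ (stat : PySem.Dict Int Int),
      (∀ (j : Nat) (hj : j < xs.length), m ≤ j → stat.get? xs[j] = some (Sspec xs z j)) →
    ∃ stat',
      (PySem.List.pyRange ((m : Int) - 1) (-1) (-1)).foldl (statStep arr) (some stat) = some stat' ∧
      ∀ (j : Nat) (hj : j < xs.length), stat'.get? xs[j] = some (Sspec xs z j) := by
  intro m
  induction m with
  | zero =>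
    intro _ stat hstat
    refine ⟨stat, ?_, fun j hj => hstat j hj (Nat.zero_le j)⟩
    rw [show ((0 : Nat) : Int) - 1 = (-1 : Int) by ring,
      PySem.List.pyRange_neg_one_eq_nil (by omega), List.foldl_nil]
  | succ m ih =>
    intro hm stat hstat
    have hn1 : 1 ≤ xs.length := by omega
    have hm1 : m < arr.length := by omega
    have hm2 : m + 1 < arr.length := by omega
    have hmx1 : m < xs.length := by omega
    have hmx2 : m + 1 < xs.length := by omega
    have hgm : PySem.List.pyGetD arr ((m : Nat) : Int) (0, 0) = (xs[m], Fcnt z xs[m]) := by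
      rw [PySem.List.pyGetD_natCast, List.getD_eq_getElem _ _ hm1]
      exact harr m hm1 hmx1
    have hgm1 : PySem.List.pyGetD arr (((m : Nat) : Int) + 1) (0, 0) =
        (xs[m + 1], Fcnt z xs[m + 1]) := by
      rw [show ((m : Nat) : Int) + 1 = ((m + 1 : Nat) : Int) by push_cast; ring,
        PySem.List.pyGetD_natCast, List.getD_eq_getElem _ _ hm2]
      exact harr (m + 1) hm2 hmx2
    have hstep : statStep arr (some stat) ((m : Nat) : Int) =
        some (stat.insert xs[m] (Sspec xs z m)) := by
      rw [statStep, Option.bind_some]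
      dsimp only
      rw [hgm, hgm1]
      dsimp only
      rw [hstat (m + 1) hmx2 (by omega)]
      dsimp only
      congr 1
      conv_rhs => rw [Sspec]
      rw [if_pos hmx2, gseg, List.getD_eq_getElem _ _ hmx1, List.getD_eq_getElem _ _ hmx2]
    have hstat1 : ∀ (j : Nat) (hj : j < xs.length), m ≤ j →
        (stat.insert xs[m] (Sspec xs z m)).get? xs[j] = some (Sspec xs z j) := by
      intro j hj hmj
      by_cases hjm : j = m
      · subst hjm
        rw [PySem.Dict.get?_insert_self]
      · have hne : xs[j] ≠ xs[m] := fun h => hjm (sortedStrict_inj hs hj hmx1 h)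
        rw [PySem.Dict.get?_insert_of_ne _ _ hne]
        exact hstat j hj (by omega)
    obtain ⟨stat', hrun, hpt⟩ := ih (by omega) (stat.insert xs[m] (Sspec xs z m)) hstat1
    refine ⟨stat', ?_, hpt⟩
    rw [show ((m + 1 : Nat) : Int) - 1 = ((m : Nat) : Int) by push_cast; ring,
      PySem.List.pyRange_neg_one_cons (by omega), List.foldl_cons, hstep]
    exact hrun

theorem Fcnt_nil (x : Int) : Fcnt [] x = 0 := by simp [Fcnt]

theorem Fcnt_cons (p : Int × Int) (z : List (Int × Int)) (x : Int) :
    Fcnt (p :: z) x = Fcnt z x + (if p.1 ≤ x ∧ x < p.2 + 1 then 1 else 0) := by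
  simp only [Fcnt, List.countP_cons]
  push_cast
  by_cases h : p.1 ≤ x ∧ x < p.2 + 1 <;> simp [h]

theorem FAcnt_zip_eq (L R : List Int) (x : Int) :
    FAcnt (L.zip (R.map (fun r => r + 1))) x = Fcnt (L.zip R) x := by
  rw [List.zip_map_right]
  simp only [FAcnt, Fcnt, List.countP_map]
  rfl

theorem Ccnt_nil (x : Int) : Ccnt [] x = 0 := by simp [Ccnt]

theorem Ccnt_cons (p : Int × Int) (z : List (Int × Int)) (x : Int) :
    Ccnt (p :: z) x =
      (if p.1 ≤ p.2 then
        (if p.1 = x then (1 : Int) else 0) - (if p.2 + 1 = x then (1 : Int) else 0)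
      else 0) + Ccnt z x := by
  simp only [Ccnt, List.filter_cons]
  by_cases hv : p.1 ≤ p.2
  · simp only [hv, decide_true, List.countP_cons, if_pos]
    push_cast
    by_cases h1 : p.1 = x <;> by_cases h2 : p.2 + 1 = x <;> simp [h1, h2] <;> ring
  · simp only [hv, decide_false, Bool.false_eq_true, if_false]
    ring

theorem deltaB_aux (x : Int) : ∀ (z : List (Int × Int)) (d : PySem.Dict Int Int),
    (z.foldl
      (fun (d : PySem.Dict Int Int) (p : Int × Int) =>
        if p.1 ≤ p.2 then
          (d.insert p.1 (d.getD p.1 0 + 1)).insert (p.2 + 1)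
            ((d.insert p.1 (d.getD p.1 0 + 1)).getD (p.2 + 1) 0 - 1)
        else d)
      d).getD x 0 = d.getD x 0 + Ccnt z x := by
  intro z
  induction z with
  | nil => intro d; simp [Ccnt_nil]
  | cons p z ih =>
    intro d
    rw [List.foldl_cons, ih, Ccnt_cons]
    by_cases hv : p.1 ≤ p.2
    · have hne : p.1 ≠ p.2 + 1 := by omega
      rw [if_pos hv, if_pos hv]
      simp only [PySem.Dict.getD_insert]
      by_cases hx2 : x = p.2 + 1
      · rw [if_pos hx2, if_neg (show ¬ (p.2 + 1 = p.1) from fun h => hne h.symm),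
          if_neg (show ¬ (p.1 = x) from fun h => hne (h.trans hx2)), if_pos hx2.symm, hx2]
        ring
      · rw [if_neg hx2]
        by_cases hx1 : x = p.1
        · rw [if_pos hx1, if_pos hx1.symm, if_neg (fun h => hx2 h.symm), hx1]
          ring
        · rw [if_neg hx1, if_neg (fun h => hx1 h.symm), if_neg (fun h => hx2 h.symm)]
          ring
    · rw [if_neg hv, if_neg hv]
      ring

theorem deltaB_getD (z : List (Int × Int)) (x : Int) : (deltaB z).getD x 0 = Ccnt z x := by
  have h := deltaB_aux x z PySem.Dict.empty
  rw [PySem.Dict.getD_empty] at h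
  rw [show (deltaB z).getD x 0 =
    (z.foldl
      (fun (d : PySem.Dict Int Int) (p : Int × Int) =>
        if p.1 ≤ p.2 then
          (d.insert p.1 (d.getD p.1 0 + 1)).insert (p.2 + 1)
            ((d.insert p.1 (d.getD p.1 0 + 1)).getD (p.2 + 1) 0 - 1)
        else d)
      PySem.Dict.empty).getD x 0 from rfl, h]
  ring

theorem cntB_run (f : Int → Int) : ∀ (xs : List Int) (as : List Int) (c : Int),
    (xs.foldl (fun (acc : List Int × Int) x => (acc.1 ++ [acc.2 + f x], acc.2 + f x)) (as, c)).1
      = as ++ (List.range xs.length).map (fun i => c + ((xs.take (i + 1)).map f).sum) := by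
  intro xs
  induction xs with
  | nil => intro as c; simp
  | cons x t ih =>
    intro as c
    rw [List.foldl_cons, ih, List.length_cons, List.range_succ_eq_map, List.map_cons,
      List.map_map, List.append_assoc, List.singleton_append]
    congr 1
    congr 1
    · simp
    · apply List.map_congr_left
      intro i _
      simp [List.take_succ_cons, Function.comp]
      ring

theorem cntB_eq (delta : PySem.Dict Int Int) (xs : List Int) :
    cntB delta xs = (List.range xs.length).map
      (fun i => ((xs.take (i + 1)).map (fun x => delta.getD x 0)).sum) := by
  have h := cntB_run (fun x => delta.getD x 0) xs [] 0
  simp only [List.nil_append, zero_add] at h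
  exact h

theorem sum_map_sub_int {α : Type} (l : List α) (f g : α → Int) :
    (l.map (fun x => f x - g x)).sum = (l.map f).sum - (l.map g).sum := by
  induction l with
  | nil => simp
  | cons x t ih => simp [ih]; ring

theorem sum_indicator (v : Int) : ∀ (l : List Int), l.Nodup →
    (l.map (fun x => if v = x then (1 : Int) else 0)).sum = if v ∈ l then 1 else 0 := by
  intro l
  induction l with
  | nil => simp
  | cons x t ih =>
    intro h
    rw [List.nodup_cons] at h
    by_cases hvx : v = x
    · subst hvx
      simp [ih h.2, h.1]
    · simp [hvx, ih h.2]

theorem sum_Ccnt {xs : List Int} (hs : xs.Pairwise (· < ·)) {i : Nat} (hi : i < xs.length) :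
    ∀ (z : List (Int × Int)), (∀ p ∈ z, p.1 ∈ xs ∧ p.2 + 1 ∈ xs) →
    ((xs.take (i + 1)).map (fun x => Ccnt z x)).sum = Fcnt z xs[i] := by
  have hnd : (xs.take (i + 1)).Nodup :=
    (List.take_sublist _ _).nodup (hs.imp (fun h => LT.lt.ne h))
  intro z
  induction z with
  | nil =>
    intro _
    rw [Fcnt_nil]
    rw [List.map_congr_left (fun x _ => Ccnt_nil x)]
    simp
  | cons p z ih =>
    intro hz
    have hmem := hz p List.mem_cons_self
    rw [List.map_congr_left (fun x (_ : x ∈ xs.take (i + 1)) => Ccnt_cons p z x),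
      Fcnt_cons]
    rw [show (fun x => ((if p.1 ≤ p.2 then
          (if p.1 = x then (1 : Int) else 0) - (if p.2 + 1 = x then (1 : Int) else 0)
        else 0) + Ccnt z x)) = (fun x => ((if p.1 ≤ p.2 then
          (if p.1 = x then (1 : Int) else 0) - (if p.2 + 1 = x then (1 : Int) else 0)
        else 0)) + (fun x => Ccnt z x) x) from rfl]
    rw [List.sum_map_add]
    rw [ih (fun p' hp' => hz p' (List.mem_cons_of_mem _ hp'))]
    have hSp : ((xs.take (i + 1)).map (fun x => (if p.1 ≤ p.2 then
          (if p.1 = x then (1 : Int) else 0) - (if p.2 + 1 = x then (1 : Int) else 0)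
        else 0))).sum = (if p.1 ≤ xs[i] ∧ xs[i] < p.2 + 1 then (1 : Int) else 0) := by
      by_cases hv : p.1 ≤ p.2
      · simp only [if_pos hv]
        rw [sum_map_sub_int, sum_indicator p.1 _ hnd, sum_indicator (p.2 + 1) _ hnd]
        simp only [mem_take_iff_le hs hi hmem.1, mem_take_iff_le hs hi hmem.2]
        by_cases h1 : p.1 ≤ xs[i] <;> by_cases h2 : p.2 + 1 ≤ xs[i] <;>
          simp [h1, h2] <;> omega
      · rw [List.map_congr_left (g := fun _ => (0 : Int)) (fun x _ => if_neg hv)]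
        have hnc : ¬ (p.1 ≤ xs[i] ∧ xs[i] < p.2 + 1) := by omega
        simp only [List.map_const', List.length_take, List.sum_replicate, smul_zero,
          if_neg hnc]
    rw [hSp]
    ring

-- the common value of A's total_cover and B's total
def Tsum (xs : List Int) (z : List (Int × Int)) : Int :=
  ((List.range (xs.length - 1)).map (fun i =>
    if 0 < Fcnt z (xs.getD i 0) then xs.getD (i + 1) 0 - xs.getD i 0 else 0)).sum

theorem totalCoverA_eq {xs : List Int} (z : List (Int × Int)) (arr : List (Int × Int))
    (hlen : arr.length = xs.length)
    (harr : ∀ (k : Nat) (hk : k < arr.length) (hkx : k < xs.length),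
      arr[k] = (xs[k], Fcnt z xs[k])) :
    totalCoverA arr = Tsum xs z := by
  rw [totalCoverA, PySem.List.pyRange_one, List.foldl_map]
  have hc : List.foldl
      (fun (x : Int) (y : Nat) =>
        if (PySem.List.pyGetD arr (0 + (y : Int)) (0, 0)).2 > 0 then
          x + ((PySem.List.pyGetD arr (0 + (y : Int) + 1) (0, 0)).1
            - (PySem.List.pyGetD arr (0 + (y : Int)) (0, 0)).1)
        else x)
      0 (List.range ((arr.length : Int) - 1 - 0).toNat)
    = List.foldl
      (fun (x : Int) (y : Nat) => x +
        (if (PySem.List.pyGetD arr (0 + (y : Int)) (0, 0)).2 > 0 then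
          ((PySem.List.pyGetD arr (0 + (y : Int) + 1) (0, 0)).1
            - (PySem.List.pyGetD arr (0 + (y : Int)) (0, 0)).1)
        else 0))
      0 (List.range ((arr.length : Int) - 1 - 0).toNat) :=
    PySem.List.foldl_congr_mem _ _ _ _ (by intro acc k _; split_ifs <;> ring)
  rw [hc, PySem.List.foldl_add, zero_add, Tsum]
  have hrange : ((arr.length : Int) - 1 - 0).toNat = xs.length - 1 := by omega
  rw [hrange]
  apply congrArg
  apply List.map_congr_left
  intro k hk
  rw [List.mem_range] at hk
  have hk1 : k < arr.length := by omega
  have hk2 : k + 1 < arr.length := by omega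
  have e1 : PySem.List.pyGetD arr (0 + (k : Int)) (0, 0) = (xs[k], Fcnt z xs[k]) := by
    rw [zero_add, PySem.List.pyGetD_natCast, List.getD_eq_getElem _ _ hk1]
    exact harr k hk1 (by omega)
  have e2 : PySem.List.pyGetD arr (0 + (k : Int) + 1) (0, 0) =
      (xs[k + 1], Fcnt z xs[k + 1]) := by
    rw [zero_add, show (k : Int) + 1 = ((k + 1 : Nat) : Int) by push_cast; ring,
      PySem.List.pyGetD_natCast, List.getD_eq_getElem _ _ hk2]
    exact harr (k + 1) hk2 (by omega)
  rw [e1, e2, List.getD_eq_getElem _ _ (show k < xs.length by omega),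
    List.getD_eq_getElem _ _ (show k + 1 < xs.length by omega)]

theorem cnt_vals {xs : List Int} (hs : xs.Pairwise (· < ·)) (z : List (Int × Int))
    (hz : ∀ p ∈ z, p.1 ∈ xs ∧ p.2 + 1 ∈ xs) :
    cntB (deltaB z) xs = (List.range xs.length).map (fun i => Fcnt z (xs.getD i 0)) := by
  rw [cntB_eq]
  apply List.map_congr_left
  intro i hi
  rw [List.mem_range] at hi
  rw [List.map_congr_left (fun x (_ : x ∈ xs.take (i + 1)) => deltaB_getD z x)]
  rw [sum_Ccnt hs hi z hz, List.getD_eq_getElem _ _ hi]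

theorem sum_filter_map_int {α : Type} (p : α → Bool) (f : α → Int) : ∀ (l : List α),
    ((l.filter p).map f).sum = (l.map (fun x => if p x then f x else 0)).sum := by
  intro l
  induction l with
  | nil => simp
  | cons x t ih =>
    rw [List.filter_cons, List.map_cons, List.sum_cons]
    by_cases h : p x
    · simp only [h, if_true, List.map_cons, List.sum_cons, ih]
    · simp [h, ih]

theorem zipzip_eq {xs : List Int} (hs : xs.Pairwise (· < ·)) (z : List (Int × Int))
    (hz : ∀ p ∈ z, p.1 ∈ xs ∧ p.2 + 1 ∈ xs) :
    (xs.zip (PySem.List.slice xs (some 1) none)).zip (cntB (deltaB z) xs) =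
      (List.range (xs.length - 1)).map
        (fun i => ((xs.getD i 0, xs.getD (i + 1) 0), Fcnt z (xs.getD i 0))) := by
  rw [PySem.List.slice_from_one, cnt_vals hs z hz]
  apply List.ext_getElem
  · simp [List.length_zip, List.length_tail]
  · intro k h1 h2
    have hk : k < xs.length - 1 := by
      simp [List.length_zip, List.length_tail] at h1
      omega
    simp only [List.getElem_zip, List.getElem_map, List.getElem_range, List.getElem_tail]
    rw [List.getD_eq_getElem _ _ (show k < xs.length by omega),
      List.getD_eq_getElem _ _ (show k + 1 < xs.length by omega)]

theorem totalB_eq {xs : List Int} (hs : xs.Pairwise (· < ·)) (z : List (Int × Int))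
    (hz : ∀ p ∈ z, p.1 ∈ xs ∧ p.2 + 1 ∈ xs) :
    totalB xs (cntB (deltaB z) xs) = Tsum xs z := by
  rw [totalB, zipzip_eq hs z hz, sum_filter_map_int, List.map_map]
  rw [Tsum]
  apply congrArg
  apply List.map_congr_left
  intro i hi
  simp only [Function.comp, decide_eq_true_eq]

-- named copy of sufB's loop body (proof-side only; sufB_eq_fold is rfl)
def sufStep (acc : PySem.Dict Int Int × Int) (t : (Int × Int) × Int) :
    PySem.Dict Int Int × Int :=
  (acc.1.insert t.1.1 (acc.2 + (if t.2 = 1 then t.1.2 - t.1.1 else 0)),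
   acc.2 + (if t.2 = 1 then t.1.2 - t.1.1 else 0))

theorem sufB_eq_fold (xs cnt : List Int) :
    sufB xs cnt =
      (((xs.zip (PySem.List.slice xs (some 1) none)).zip cnt).reverse.foldl sufStep
        ((match PySem.List.pyGet? xs (-1) with
          | some v => PySem.Dict.empty.insert v 0
          | none => PySem.Dict.empty), 0)).1 :=
  rfl

theorem Sspec_last (xs : List Int) (z : List (Int × Int)) :
    Sspec xs z (xs.length - 1) = 0 := by
  rw [Sspec, if_neg (by omega)]

theorem sufB_loop {xs : List Int} (hs : xs.Pairwise (· < ·)) (z : List (Int × Int)) :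
    ∀ (m : Nat), m ≤ xs.length - 1 →
    ∀ (d : PySem.Dict Int Int),
      (∀ (j : Nat) (hj : j < xs.length), m ≤ j → d.get? xs[j] = some (Sspec xs z j)) →
    ∀ (j : Nat) (hj : j < xs.length),
      ((((List.range m).map
          (fun i => ((xs.getD i 0, xs.getD (i + 1) 0), Fcnt z (xs.getD i 0)))).reverse.foldl
        sufStep (d, Sspec xs z m)).1).get? xs[j] = some (Sspec xs z j) := by
  intro m
  induction m with
  | zero =>
    intro _ d hd j hj
    simpa using hd j hj (Nat.zero_le j)
  | succ m ih =>
    intro hm d hd j hj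
    have hmx1 : m < xs.length := by omega
    have hmx2 : m + 1 < xs.length := by omega
    rw [List.range_succ, List.map_append, List.map_cons, List.map_nil,
      List.reverse_append, List.reverse_cons, List.reverse_nil, List.nil_append,
      List.singleton_append, List.foldl_cons]
    have hstep : sufStep (d, Sspec xs z (m + 1))
        ((xs.getD m 0, xs.getD (m + 1) 0), Fcnt z (xs.getD m 0)) =
        (d.insert xs[m] (Sspec xs z m), Sspec xs z m) := by
      rw [sufStep]
      have hv : Sspec xs z (m + 1) +
          (if Fcnt z (xs.getD m 0) = 1 then xs.getD (m + 1) 0 - xs.getD m 0 else 0) =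
          Sspec xs z m := by
        conv_rhs => rw [Sspec]
        rw [if_pos hmx2, gseg]
        by_cases hF : Fcnt z (xs.getD m 0) = 1
        · rw [if_pos hF, if_pos hF]; ring
        · rw [if_neg hF, if_neg hF]; ring
      dsimp only
      rw [hv, List.getD_eq_getElem _ _ hmx1]
    rw [hstep]
    have hd1 : ∀ (j : Nat) (hj : j < xs.length), m ≤ j →
        (d.insert xs[m] (Sspec xs z m)).get? xs[j] = some (Sspec xs z j) := by
      intro j hj hmj
      by_cases hjm : j = m
      · subst hjm
        rw [PySem.Dict.get?_insert_self]
      · have hne : xs[j] ≠ xs[m] := fun h => hjm (sortedStrict_inj hs hj hmx1 h)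
        rw [PySem.Dict.get?_insert_of_ne _ _ hne]
        exact hd j hj (by omega)
    exact ih (by omega) _ hd1 j hj

theorem best_congr (stat suf : PySem.Dict Int Int) (q : List (Int × Int))
    (h : ∀ p ∈ q, stat.get? p.1 = suf.get? p.1 ∧ stat.get? p.2 = suf.get? p.2) :
    maxDecreasingA stat q = bestB suf q := by
  rw [maxDecreasingA, bestB]
  apply PySem.List.foldl_congr_mem
  intro acc p hp
  rw [(h p hp).1, (h p hp).2]

theorem solve_eq_alt (L R : List Int) (hpre : Pre_solve L R) : solve L R = solve_alt L R := by
  set R' := R.map (fun r => r + 1) with hR'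
  set xs := PySem.List.sorted (PySem.Set.ofList (L ++ R')) (fun x => x) false with hxs
  set z := L.zip R with hz
  set q := L.zip R' with hq
  have hsx : xs.Pairwise (· < ·) := PySem.List.sorted_ofList_pairwise_lt (L ++ R')
  have hmem : ∀ v, v ∈ L ++ R' → v ∈ xs := by
    intro v hv
    rw [hxs, PySem.List.mem_sorted]
    exact (PySem.Set.mem_ofList _ _).mpr hv
  have hq_mem : ∀ p ∈ q, p.1 ∈ xs ∧ p.2 ∈ xs := by
    rintro ⟨a, b⟩ hp
    have h1 := List.of_mem_zip hp
    exact ⟨hmem _ (List.mem_append_left _ h1.1), hmem _ (List.mem_append_right _ h1.2)⟩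
  have hz_mem : ∀ p ∈ z, p.1 ∈ xs ∧ p.2 + 1 ∈ xs := by
    rintro ⟨a, b⟩ hp
    have h1 := List.of_mem_zip hp
    refine ⟨hmem _ (List.mem_append_left _ h1.1), hmem _ (List.mem_append_right _ ?_)⟩
    exact List.mem_map_of_mem h1.2
  have hne : xs ≠ [] := by
    rw [hxs, Ne, PySem.List.sorted_eq_nil_iff]
    intro h0
    have hLR : L ++ R' = [] := by
      rw [List.eq_nil_iff_forall_not_mem]
      intro v hv
      have := (PySem.Set.mem_ofList _ _).mpr hv
      rw [h0] at this
      simp at this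
    rw [List.append_eq_nil_iff] at hLR
    have hR0 : R = [] := by
      have := hLR.2
      rw [hR'] at this
      simpa using this
    exact hpre ⟨hLR.1, hR0⟩
  have hn : 0 < xs.length := List.length_pos_iff.mpr hne
  -- A side: the covered array
  have harr0 : (xs.map (fun i => (i, (0 : Int)))).map Prod.fst = xs := by
    rw [List.map_map, show (Prod.fst ∘ fun i : Int => (i, (0 : Int))) = id from rfl,
      List.map_id]
  obtain ⟨arrF, hcov, hfstF, hwF⟩ := covA_eq hsx q hq_mem _ harr0
  have hlenF : arrF.length = xs.length := by
    have := congrArg List.length hfstF; simpa using this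
  have harrF : ∀ (k : Nat) (hk : k < arrF.length) (hkx : k < xs.length),
      arrF[k] = (xs[k], Fcnt z xs[k]) := by
    intro k hk hkx
    have h1 : (arrF[k]).1 = xs[k] := by
      have := List.getElem_of_eq hfstF (show k < (arrF.map Prod.fst).length by simpa using hk)
      simpa using this
    have h2 := hwF k (by simpa using hkx) hk hkx
    have h3 : ((xs.map (fun i => (i, (0 : Int))))[k]'(by simpa using hkx)).2 = 0 := by simp
    have h4 : (arrF[k]).2 = Fcnt z xs[k] := by
      rw [h2, h3, zero_add, hq, hR', FAcnt_zip_eq, ← hz]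
    exact Prod.ext h1 h4
  -- last entry of the array: weight 0 (the assert)
  have hlast0 : Fcnt z (xs[xs.length - 1]'(by omega)) = 0 := by
    simp only [Fcnt, Int.natCast_eq_zero, List.countP_eq_zero, decide_eq_true_eq]
    intro p hp
    have hb := (hz_mem _ hp).2
    obtain ⟨j, hj, hjeq⟩ := List.mem_iff_getElem.mp hb
    have hle : xs[j] ≤ xs[xs.length - 1]'(by omega) :=
      (sortedStrict_le_iff hsx (by omega) hj).mpr (by omega)
    omega
  have hlast : PySem.List.pyGet? arrF (-1) =
      some (xs[xs.length - 1]'(by omega), Fcnt z (xs[xs.length - 1]'(by omega))) := by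
    rw [PySem.List.pyGet?_neg_one, List.getLast?_eq_getElem?,
      show arrF.length - 1 = xs.length - 1 by omega,
      List.getElem?_eq_getElem (show xs.length - 1 < arrF.length by omega),
      harrF (xs.length - 1) (by omega) (by omega)]
  -- stat dict
  have hstat0 : ∀ (j : Nat) (hj : j < xs.length), xs.length - 1 ≤ j →
      (PySem.Dict.empty.insert (xs[xs.length - 1]'(by omega)) 0).get? xs[j] =
        some (Sspec xs z j) := by
    intro j hj hj2
    have hje : j = xs.length - 1 := by omega
    subst hje
    rw [PySem.Dict.get?_insert_self, Sspec_last]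
  obtain ⟨statF, hstatrun, hstatpt⟩ :=
    statA_loop hsx z arrF hlenF harrF (xs.length - 1) (by omega)
      (PySem.Dict.empty.insert (xs[xs.length - 1]'(by omega)) 0) hstat0
  have hstatA : statA arrF (PySem.Dict.empty.insert (xs[xs.length - 1]'(by omega)) 0) =
      some statF := by
    rw [statA_eq_fold, show ((arrF.length : Int) - 2) = ((xs.length - 1 : Nat) : Int) - 1 by omega]
    exact hstatrun
  -- B side: suf dict
  have hxl : PySem.List.pyGet? xs (-1) = some (xs[xs.length - 1]'(by omega)) := by
    rw [PySem.List.pyGet?_neg_one, List.getLast?_eq_getElem?,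
      List.getElem?_eq_getElem (by omega)]
  have hsuf : ∀ (j : Nat) (hj : j < xs.length),
      (sufB xs (cntB (deltaB z) xs)).get? xs[j] = some (Sspec xs z j) := by
    intro j hj
    rw [sufB_eq_fold, hxl]
    dsimp only
    rw [zipzip_eq hsx z hz_mem]
    have hfold := sufB_loop hsx z (xs.length - 1) (by omega)
      (PySem.Dict.empty.insert (xs[xs.length - 1]'(by omega)) 0) hstat0 j hj
    rw [Sspec_last] at hfold
    exact hfold
  -- the two final dict lookups agree
  have hbest : maxDecreasingA statF q = bestB (sufB xs (cntB (deltaB z) xs)) q := by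
    apply best_congr
    rintro ⟨a, b⟩ hp
    obtain ⟨ha, hb⟩ := hq_mem _ hp
    dsimp only at ha hb
    obtain ⟨ja, hja, haeq⟩ := List.mem_iff_getElem.mp ha
    obtain ⟨jb, hjb, hbeq⟩ := List.mem_iff_getElem.mp hb
    constructor
    · dsimp only
      rw [← haeq, hstatpt ja hja, hsuf ja hja]
    · dsimp only
      rw [← hbeq, hstatpt jb hjb, hsuf jb hjb]
  have htot : totalCoverA arrF = totalB xs (cntB (deltaB z) xs) :=
    (totalCoverA_eq z arrF hlenF harrF).trans (totalB_eq hsx z hz_mem).symm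
  -- assemble both sides
  rw [solve, solve_alt]
  rw [← hR', ← hxs, ← hz, ← hq]
  rw [hcov]
  dsimp only
  rw [hlast]
  dsimp only
  rw [if_pos hlast0, hstatA]
  dsimp only
  rw [hbest, htot]

-- ===== VERDICT (by name: the statement is the Claim_ definition above) =====
theorem solve_spec : Claim_equal_solve := by
  intro L R _ hpre
  unfold Spec_solve
  exact solve_eq_alt L R hpre
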